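-- pv_equiv track=rewrite | github.com/ssyng162/Algorithm | 프로그래머스/Lv1/신고결과받기.py | solution
-- ===== SOURCE A (Python) =====
-- def solution(id_list, report, k):
--     reported = {}
--
--     for r in set(report):
--         reporter, subject = r.split()
--         reported.setdefault(subject, []).append(reporter)
--
--     mail_list = {}
--
--     for subject, reporters in reported.items():
--         if len(reporters) >= k:
--             for reporter in reporters:
--                 mail_list[reporter] = mail_list.get(reporter, 0) + 1
--
--     return [mail_list.get(user_id, 0) for user_id in id_list]
-- ===== SOURCE B (Python) =====
-- def solution(id_list, report, k):
--     pairs = [tuple(r.split()) for r in dict.fromkeys(report)]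
--     subjects = [s for _, s in pairs]
--     hot = {s for s in subjects if subjects.count(s) >= k}
--     return [sum(1 for rep, s in pairs if rep == u and s in hot) for u in id_list]
-- ===== Notes on version B (the rewrite author's own statement) =====
-- stated objective: alternative
-- what changed: A builds a subject -> reporter-list table and then a reporter -> mail-count dict via a nested loop, finally looking each user up; B builds no per-reporter table at all: it computes the set of subjects reported at least k times and then produces each output entry directly, counting for each user the deduplicated report pairs whose reporter is that user and whose subject is hot.
import Mathlib
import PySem

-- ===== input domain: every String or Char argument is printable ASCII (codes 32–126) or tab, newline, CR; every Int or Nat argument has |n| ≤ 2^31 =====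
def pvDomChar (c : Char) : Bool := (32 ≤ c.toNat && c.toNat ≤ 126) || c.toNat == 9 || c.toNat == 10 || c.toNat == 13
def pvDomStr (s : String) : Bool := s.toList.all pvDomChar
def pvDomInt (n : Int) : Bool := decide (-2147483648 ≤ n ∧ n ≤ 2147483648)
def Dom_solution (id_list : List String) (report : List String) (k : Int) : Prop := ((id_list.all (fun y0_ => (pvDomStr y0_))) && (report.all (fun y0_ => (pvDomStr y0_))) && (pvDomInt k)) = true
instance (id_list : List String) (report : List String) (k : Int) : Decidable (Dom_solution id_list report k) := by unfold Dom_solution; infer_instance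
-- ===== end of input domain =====

-- B drops A's reporter->mail-count table entirely: it computes the set of subjects reported
-- at least k times and then produces each output entry directly by counting, per user, the
-- deduplicated report pairs with that reporter and a hot subject (objective: alternative).


-- ===== PORT A =====
-- 'for r in set(report)' iterates Python's set; its order is unspecified but the result is
-- order-independent, ported as PySem.Set.ofList (first-occurrence order).
-- 'reported.setdefault(subject, []).append(reporter)' has exactly the key-order/value effect of
-- d.modify subject [] (· ++ [reporter]).  'reporter, subject = r.split()' raises unless the split
-- has exactly two tokens (outside Pre_); the match falls through unchanged there.
def solution (id_list : List String) (report : List String) (k : Int) : List Int :=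
  let reported : PySem.Dict String (List String) :=
    (PySem.Set.ofList report).foldl (fun d r =>
      match PySem.Str.split₀ r with
      | [reporter, subject] => d.modify subject [] (· ++ [reporter])
      | _ => d) PySem.Dict.empty
  let mail_list : PySem.Dict String Int :=
    reported.items.foldl (fun m p =>
      if k ≤ (p.2.length : Int) then
        p.2.foldl (fun m reporter => m.insert reporter (m.getD reporter 0 + 1)) m
      else m) PySem.Dict.empty
  id_list.map (fun u => mail_list.getD u 0)

-- ===== PORT B =====
-- dict.fromkeys(report) is PySem.List.dedup; tuple(r.split()) raises unless the split has
-- exactly two tokens (outside Pre_), so the 2-tuple is ported as the split's components 0 and 1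
-- (exact under Pre_; the "" defaults are never reached there).
-- The set comprehension is Set.ofList of the filtered subject list; sum(1 for … if …) is the
-- corresponding conditional +1 fold.
def solution_alt (id_list : List String) (report : List String) (k : Int) : List Int :=
  let pairs : List (String × String) := (PySem.List.dedup report).map (fun r =>
    ((PySem.Str.split₀ r).getD 0 "", (PySem.Str.split₀ r).getD 1 ""))
  let subjects := pairs.map (fun p => p.2)
  let hot : PySem.Set String :=
    PySem.Set.ofList (subjects.filter (fun s => k ≤ (subjects.count s : Int)))
  id_list.map (fun u =>
    pairs.foldl (fun acc p => if p.1 == u && hot.contains p.2 then acc + 1 else acc) 0)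

-- ===== PRECONDITION & SPEC =====
-- A raises ValueError (unpacking r.split()) on any report entry that does not split into exactly
-- two whitespace-separated tokens; exactly those inputs are excluded.
def Pre_solution (id_list : List String) (report : List String) (k : Int) : Prop :=
  ∀ r ∈ report, (PySem.Str.split₀ r).length = 2
instance (id_list : List String) (report : List String) (k : Int) : Decidable (Pre_solution id_list report k) := by unfold Pre_solution; infer_instance

def pvWitness_solution : List String × List String × Int :=
  (["mu", "fro", "apeach", "neo"], ["mu fro", "apeach fro", "fro neo", "mu neo", "apeach mu", "mu fro"], 2)

def Spec_solution (id_list : List String) (report : List String) (k : Int) (out : List Int) : Prop := out = solution_alt id_list report k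
instance (id_list : List String) (report : List String) (k : Int) (out : List Int) : Decidable (Spec_solution id_list report k out) := by unfold Spec_solution; infer_instance

-- ===== CLAIM (what is proved, stated in full; the proofs are below) =====
def Claim_equal_solution : Prop := ∀ (id_list : List String) (report : List String) (k : Int), Dom_solution id_list report k → Pre_solution id_list report k → Spec_solution id_list report k (solution id_list report k)

-- ===== LEMMAS AND PROOFS =====

-- the two fields of r.split() as total functions (equal to the match results under Pre_)
def pvFst (r : String) : String := (PySem.Str.split₀ r).getD 0 ""
def pvSnd (r : String) : String := (PySem.Str.split₀ r).getD 1 ""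

theorem pvSplit_eq {r : String} (h : (PySem.Str.split₀ r).length = 2) :
    PySem.Str.split₀ r = [pvFst r, pvSnd r] := by
  unfold pvFst pvSnd
  rcases e : PySem.Str.split₀ r with _ | ⟨a, _ | ⟨b, _ | _⟩⟩ <;> simp_all

-- A's outer loop: resulting mail count at u, as a sum over the items list
theorem mailA_getD (k : Int) (u : String) (its : List (String × List String)) (d : PySem.Dict String Int) :
    (its.foldl (fun m p =>
      if k ≤ (p.2.length : Int) then
        p.2.foldl (fun m reporter => m.insert reporter (m.getD reporter 0 + 1)) m
      else m) d).getD u 0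
    = d.getD u 0 + (its.map (fun p => if k ≤ (p.2.length : Int) then (p.2.count u : Int) else 0)).sum := by
  induction its generalizing d with
  | nil => simp
  | cons p its ih =>
      simp only [List.foldl_cons, List.map_cons, List.sum_cons, ih]
      split_ifs with h
      · rw [PySem.Dict.getD_foldl_insert_add_one]; ring
      · ring

-- splitting a 0/1-sum over a list along a Boolean test on the elements
theorem sum_split (q : String → Bool) (f : String → Int) (S : List String) :
    (S.map f).sum = ((S.filter q).map f).sum + ((S.filter (fun r => !q r)).map f).sum := by
  induction S with
  | nil => simp
  | cons r S ih =>
      by_cases h : q r = true <;> simp [h, ih] <;> ring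

-- the grouping identity: summing per-subject qualifying counts over the distinct subjects
-- equals one flat 0/1-scan of the reports
theorem group_sum (u : String) (Q : String → Prop) [DecidablePred Q] (C : List String) :
    ∀ S : List String, C.Nodup → (∀ r ∈ S, pvSnd r ∈ C) →
    (C.map (fun c => if Q c then (((S.filter (fun r => pvSnd r == c)).map pvFst).count u : Int) else 0)).sum
    = (S.map (fun r => if Q (pvSnd r) ∧ pvFst r = u then (1 : Int) else 0)).sum := by
  induction C with
  | nil =>
      intro S _ hS
      have : S = [] := List.eq_nil_iff_forall_not_mem.2 (fun r hr => by simpa using hS r hr)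
      simp [this]
  | cons c C ih =>
      intro S hnd hS
      simp only [List.map_cons, List.sum_cons]
      conv_rhs => rw [sum_split (fun r => pvSnd r == c)]
      have hmem : ∀ r ∈ S.filter (fun r => pvSnd r == c), pvSnd r = c := by
        intro r hr
        have := List.of_mem_filter hr
        simpa using this
      have e1 : ((S.filter (fun r => pvSnd r == c)).map
          (fun r => if Q (pvSnd r) ∧ pvFst r = u then (1 : Int) else 0)).sum
          = if Q c then (((S.filter (fun r => pvSnd r == c)).map pvFst).count u : Int) else 0 := by
        by_cases hq : Q c
        · rw [if_pos hq, List.count_eq_countP, List.countP_map]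
          simp only [Function.comp_def]
          rw [← PySem.List.sum_map_ite_one_zero (fun r => pvFst r == u)
              (S.filter (fun r => pvSnd r == c))]
          congr 1
          apply List.map_congr_left
          intro r hr
          rw [hmem r hr]
          by_cases h : pvFst r = u <;> simp [h, hq]
        · rw [if_neg hq]
          have : ∀ r ∈ S.filter (fun r => pvSnd r == c),
              (if Q (pvSnd r) ∧ pvFst r = u then (1 : Int) else 0) = 0 := by
            intro r hr
            rw [hmem r hr, if_neg (fun hc => hq hc.1)]
          rw [List.map_congr_left this]
          simp
      have e3 : ∀ c' ∈ C, (S.filter (fun r => !(pvSnd r == c))).filter (fun r => pvSnd r == c')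
          = S.filter (fun r => pvSnd r == c') := by
        intro c' hc'
        have hne : c' ≠ c := fun e => (List.nodup_cons.1 hnd).1 (e ▸ hc')
        rw [List.filter_filter]
        apply List.filter_congr
        intro r _
        by_cases h : pvSnd r = c' <;> simp [h, hne]
      rw [e1]
      congr 1
      rw [← ih (S.filter (fun r => !(pvSnd r == c))) hnd.of_cons (by
          intro r hr
          have h1 := List.mem_of_mem_filter hr
          have h2 := List.of_mem_filter hr
          simp only [Bool.not_eq_true', beq_eq_false_iff_ne, ne_eq] at h2
          rcases List.mem_cons.1 (hS r h1) with h | h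
          · exact absurd h h2
          · exact h)]
      congr 1
      apply List.map_congr_left
      intro c' hc'
      rw [e3 c' hc']

-- proof-side names for the two ports' intermediate values (small goals; all defeq to the ports)
def pvPair (r : String) : String × String :=
  ((PySem.Str.split₀ r).getD 0 "", (PySem.Str.split₀ r).getD 1 "")
def pvPairs (report : List String) : List (String × String) :=
  (PySem.List.dedup report).map (fun r => pvPair r)
def pvSubjects (report : List String) : List String :=
  (pvPairs report).map (fun p => p.2)
def pvHot (report : List String) (k : Int) : PySem.Set String :=
  PySem.Set.ofList ((pvSubjects report).filter (fun s => k ≤ ((pvSubjects report).count s : Int)))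
def pvCountB (report : List String) (k : Int) (u : String) : Int :=
  (pvPairs report).foldl (fun acc p => if p.1 == u && (pvHot report k).contains p.2 then acc + 1 else acc) 0
def pvRepD (report : List String) : PySem.Dict String (List String) :=
  (PySem.Set.ofList report).foldl (fun d r =>
    match PySem.Str.split₀ r with
    | [reporter, subject] => d.modify subject [] (· ++ [reporter])
    | _ => d) PySem.Dict.empty
def pvMailA (report : List String) (k : Int) : PySem.Dict String Int :=
  (pvRepD report).items.foldl (fun m p =>
    if k ≤ (p.2.length : Int) then
      p.2.foldl (fun m reporter => m.insert reporter (m.getD reporter 0 + 1)) m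
    else m) PySem.Dict.empty

theorem solutionA_eq (id_list report : List String) (k : Int) :
    solution id_list report k = id_list.map (fun u => (pvMailA report k).getD u 0) := rfl

theorem solutionB_eq (id_list report : List String) (k : Int) :
    solution_alt id_list report k = id_list.map (fun u => pvCountB report k u) := rfl

-- the heart of the proof: for every user u A's mail dictionary agrees with B's direct count
theorem mail_eq (report : List String) (k : Int)
    (hpre : ∀ r ∈ report, (PySem.Str.split₀ r).length = 2) (u : String) :
    (pvMailA report k).getD u 0 = pvCountB report k u := by
  set S : List String := PySem.Set.ofList report with hs
  have hSpre : ∀ r ∈ S, PySem.Str.split₀ r = [pvFst r, pvSnd r] := by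
    intro r hr
    exact pvSplit_eq (hpre r ((PySem.Set.mem_ofList report r).1 hr))
  have hpairs : pvPairs report = S.map (fun r => (pvFst r, pvSnd r)) := by
    unfold pvPairs pvPair pvFst pvSnd
    rw [PySem.List.dedup_eq_ofList, ← hs]
  have hsub : pvSubjects report = S.map pvSnd := by
    unfold pvSubjects
    rw [hpairs, List.map_map]
    rfl
  have hrep : pvRepD report
      = (S.map (fun r => (pvSnd r, pvFst r))).foldl
          (fun d p => d.modify p.1 [] (· ++ [p.2])) PySem.Dict.empty := by
    unfold pvRepD
    rw [← hs, List.foldl_map]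
    exact PySem.List.foldl_congr_mem _ _ _ _ (fun d r hr => by rw [hSpre r hr])
  set rep := (S.map (fun r => (pvSnd r, pvFst r))).foldl
      (fun d p => d.modify p.1 [] (· ++ [p.2])) PySem.Dict.empty with hrepd
  have hnodup : rep.keys.Nodup := by
    rw [hrepd, List.foldl_map]
    exact PySem.Dict.nodup_keys_foldl_modify_key S (fun r => pvSnd r) []
      (fun d r v => v ++ [pvFst r]) PySem.Dict.empty (by simp [PySem.Dict.empty, PySem.Dict.keys])
  have hkeys : rep.keys = PySem.Set.ofList (S.map pvSnd) := by
    rw [hrepd, List.foldl_map,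
      PySem.Dict.keys_foldl_modify_key S (fun r => pvSnd r) [] (fun d r v => v ++ [pvFst r])]
    rfl
  have hgetD : ∀ c, rep.getD c [] = (S.filter (fun r => pvSnd r == c)).map pvFst := by
    intro c
    rw [hrepd, PySem.Dict.getD_foldl_modify_append]
    simp [List.filter_map, Function.comp_def]
  have hitems : rep.items = rep.keys.map (fun c => (c, rep.getD c [])) :=
    PySem.Dict.items_eq_map_keys rep hnodup []
  -- membership in B's hot set, for a report of S, is 'my subject is reported ≥ k times'
  have hhot : ∀ r ∈ S, (pvSnd r ∈ pvHot report k
      ↔ k ≤ ((S.map pvSnd).count (pvSnd r) : Int)) := by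
    intro r hr
    unfold pvHot
    rw [PySem.Set.mem_ofList, hsub, List.mem_filter]
    constructor
    · rintro ⟨-, h⟩; simpa using h
    · intro h; exact ⟨List.mem_map_of_mem hr, by simpa using h⟩
  unfold pvMailA
  rw [hrep, hitems, mailA_getD]
  rw [PySem.Dict.getD_empty, zero_add]
  unfold pvCountB
  rw [hpairs, List.foldl_map, PySem.List.foldl_if_add_one, zero_add,
      ← PySem.List.sum_map_ite_one_zero
        (fun r => pvFst r == u && (pvHot report k).contains (pvSnd r)) S]
  rw [List.map_map]
  calc (rep.keys.map ((fun p => if k ≤ (p.2.length : Int) then (p.2.count u : Int) else 0) ∘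
          fun c => (c, rep.getD c []))).sum
      = (rep.keys.map (fun c => if k ≤ (((S.map pvSnd).count c : Nat) : Int)
          then (((S.filter (fun r => pvSnd r == c)).map pvFst).count u : Int) else 0)).sum := by
        congr 1
        apply List.map_congr_left
        intro c _
        simp only [Function.comp_def, hgetD c]
        have hlen : ((S.filter (fun r => pvSnd r == c)).map pvFst).length = (S.map pvSnd).count c := by
          rw [List.length_map, List.count_eq_countP, List.countP_map, ← List.countP_eq_length_filter]
          rfl
        rw [hlen]
    _ = (S.map (fun r => if (k ≤ (((S.map pvSnd).count (pvSnd r) : Nat) : Int)) ∧ pvFst r = u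
          then (1 : Int) else 0)).sum := by
        apply group_sum u (fun c => k ≤ (((S.map pvSnd).count c : Nat) : Int)) rep.keys S hnodup
        intro r hr
        rw [hkeys, PySem.Set.mem_ofList]
        exact List.mem_map_of_mem hr
    _ = _ := by
        congr 1
        apply List.map_congr_left
        intro r hr
        by_cases h1 : k ≤ (((S.map pvSnd).count (pvSnd r) : Nat) : Int) <;>
          by_cases h2 : pvFst r = u <;>
          simp [h1, h2, hhot r hr]

-- ===== VERDICT (by name: the statement is the Claim_ definition above) =====
theorem solution_spec : Claim_equal_solution := by
  intro id_list report k _ hpre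
  unfold Spec_solution
  rw [solutionA_eq, solutionB_eq]
  apply List.map_congr_left
  intro u _
  exact mail_eq report k hpre u
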